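-- pv_equiv track=rewrite | github.com/johnlaschober/Soccer-Passing-Analysis | shortestPathSoccer.py | allPermutationsExcept
-- ===== SOURCE A (Python) =====
-- def allPermutationsExcept(inputList, ignore) :
-- 	results = []
-- 	for i in range(5) :
-- 		if inputList[i] != ignore :
-- 			for j in range(5) :
-- 				if j != i and inputList[j] != ignore :
-- 					results.append([inputList[i],inputList[j]])
-- 	return results
-- ===== SOURCE B (Python) =====
-- def allPermutationsExcept(inputList, ignore):
--     survivors = [inputList[i] for i in range(5) if inputList[i] != ignore]
--
--     def go(before, rest):
--         # pairs whose first component lies in `rest`, using zipper (before, rest)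
--         if not rest:
--             return []
--         x, after = rest[0], rest[1:]
--         return [[x, y] for y in before + after] + go(before + [x], after)
--
--     return go([], survivors)
-- ===== Notes on version B (the rewrite author's own statement) =====
-- stated objective: alternative
-- what changed: B replaces A's nested index loops with filtering into a survivors list once and a structural zipper recursion (seen-prefix, remaining-suffix) that pairs each head with prefix ++ suffix, eliminating index arithmetic and the distinct-index test.
import Mathlib
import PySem

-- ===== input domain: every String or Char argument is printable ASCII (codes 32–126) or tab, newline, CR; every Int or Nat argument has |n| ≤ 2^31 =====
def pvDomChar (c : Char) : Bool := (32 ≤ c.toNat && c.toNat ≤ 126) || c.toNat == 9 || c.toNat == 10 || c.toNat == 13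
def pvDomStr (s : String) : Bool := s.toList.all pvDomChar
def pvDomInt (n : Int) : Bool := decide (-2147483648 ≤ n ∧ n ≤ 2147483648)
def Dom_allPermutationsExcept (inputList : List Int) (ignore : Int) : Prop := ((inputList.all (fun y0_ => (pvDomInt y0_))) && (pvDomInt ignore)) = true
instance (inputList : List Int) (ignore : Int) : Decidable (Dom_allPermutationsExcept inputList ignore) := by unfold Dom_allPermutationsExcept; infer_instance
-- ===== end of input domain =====

-- B filters the five positions into a survivors list once, then produces the pairs by a structural
-- recursion on a zipper (seen-prefix, remaining-suffix): each step pairs the head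
-- against prefix ++ suffix — no index loops (alternative decomposition; equivalence
-- of the RETURN values is proved for lists of length ≥ 5, where A returns).

-- ===== PORT A =====
-- A: nested index loops over range(5), filtering inside both loops, appending pairs.
def allPermutationsExcept (inputList : List Int) (ignore : Int) : List (List Int) :=
  (PySem.List.pyRange 0 5 1).foldl (fun results i =>
    if PySem.List.pyGetD inputList i 0 ≠ ignore then
      (PySem.List.pyRange 0 5 1).foldl (fun results j =>
        if j ≠ i ∧ PySem.List.pyGetD inputList j 0 ≠ ignore then
          results ++ [[PySem.List.pyGetD inputList i 0, PySem.List.pyGetD inputList j 0]]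
        else results) results
    else results) []

-- ===== PORT B =====
-- zipper recursion of Source B's `go`: head paired with before ++ after, then recurse
def pvGo (before : List Int) : List Int → List (List Int)
  | [] => []
  | x :: after => ((before ++ after).map (fun y => [x, y])) ++ pvGo (before ++ [x]) after

def allPermutationsExcept_alt (inputList : List Int) (ignore : Int) : List (List Int) :=
  pvGo [] ((PySem.List.pyRange 0 5 1).filterMap (fun i =>
    if PySem.List.pyGetD inputList i 0 ≠ ignore then some (PySem.List.pyGetD inputList i 0) else none))

-- ===== PRECONDITION & SPEC =====
-- Pre_: the Python A indexes positions 0..4 unconditionally, so it raises IndexError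
-- on lists shorter than 5; those inputs are excluded.
def Pre_allPermutationsExcept (inputList : List Int) (ignore : Int) : Prop :=
  5 ≤ inputList.length
instance (inputList : List Int) (ignore : Int) : Decidable (Pre_allPermutationsExcept inputList ignore) := by unfold Pre_allPermutationsExcept; infer_instance

def pvWitness_allPermutationsExcept : List Int × Int := ([1, 2, 0, 3, 0], 0)

def Spec_allPermutationsExcept (inputList : List Int) (ignore : Int) (out : List (List Int)) : Prop := out = allPermutationsExcept_alt inputList ignore
instance (inputList : List Int) (ignore : Int) (out : List (List Int)) : Decidable (Spec_allPermutationsExcept inputList ignore out) := by unfold Spec_allPermutationsExcept; infer_instance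

-- ===== CLAIM (what is proved, stated in full; the proofs are below) =====
def Claim_equal_allPermutationsExcept : Prop := ∀ (inputList : List Int) (ignore : Int), Dom_allPermutationsExcept inputList ignore → Pre_allPermutationsExcept inputList ignore → Spec_allPermutationsExcept inputList ignore (allPermutationsExcept inputList ignore)

-- ===== LEMMAS AND PROOFS =====

-- evaluation of pyGetD at the five literal indices of a length-≥5 cons list
theorem pvGetD1 (x0 x1 x2 x3 x4 : Int) (t : List Int) :
    PySem.List.pyGetD (x0::x1::x2::x3::x4::t) 1 0 = x1 := by
  rw [show (1:Int) = ((1:Nat):Int) from rfl, PySem.List.pyGetD_natCast]; rfl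
theorem pvGetD2 (x0 x1 x2 x3 x4 : Int) (t : List Int) :
    PySem.List.pyGetD (x0::x1::x2::x3::x4::t) 2 0 = x2 := by
  rw [show (2:Int) = ((2:Nat):Int) from rfl, PySem.List.pyGetD_natCast]; rfl
theorem pvGetD3 (x0 x1 x2 x3 x4 : Int) (t : List Int) :
    PySem.List.pyGetD (x0::x1::x2::x3::x4::t) 3 0 = x3 := by
  rw [show (3:Int) = ((3:Nat):Int) from rfl, PySem.List.pyGetD_natCast]; rfl
theorem pvGetD4 (x0 x1 x2 x3 x4 : Int) (t : List Int) :
    PySem.List.pyGetD (x0::x1::x2::x3::x4::t) 4 0 = x4 := by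
  rw [show (4:Int) = ((4:Nat):Int) from rfl, PySem.List.pyGetD_natCast]; rfl

-- ===== VERDICT (by name: the statement is the Claim_ definition above) =====
set_option maxHeartbeats 4000000 in
theorem allPermutationsExcept_spec : Claim_equal_allPermutationsExcept := by
  intro l ig _ hpre
  unfold Pre_allPermutationsExcept at hpre
  rcases l with _ | ⟨a, _ | ⟨b, _ | ⟨c, _ | ⟨d, _ | ⟨e, t⟩⟩⟩⟩⟩ <;>
    simp only [List.length_nil, List.length_cons] at hpre <;> try omega
  show Spec_allPermutationsExcept _ _ _
  unfold Spec_allPermutationsExcept allPermutationsExcept allPermutationsExcept_alt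
  by_cases h0 : a = ig <;> by_cases h1 : b = ig <;> by_cases h2 : c = ig <;>
    by_cases h3 : d = ig <;> by_cases h4 : e = ig <;>
    simp [PySem.List.pyRange, List.range_succ, pvGo, List.filterMap,
      pvGetD1, pvGetD2, pvGetD3, pvGetD4, h0, h1, h2, h3, h4]
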